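-- pv_equiv track=rewrite | github.com/hassan-mehedi/openvpn-linux-client-gui | src/core/onboarding.py | _extract_embedded_auth
-- ===== SOURCE A (Python) =====
-- def _extract_embedded_auth(lines: list[str]) -> tuple[str, str | None] | None:
--     for index, raw_line in enumerate(lines):
--         if raw_line.strip().lower() != "<auth-user-pass>":
--             continue
--         username: str | None = None
--         password: str | None = None
--         for embedded_line in lines[index + 1 :]:
--             stripped = embedded_line.strip()
--             if stripped.lower() == "</auth-user-pass>":
--                 return (username or "", password)
--             if stripped and username is None:
--                 username = stripped
--             elif stripped and password is None:
--                 password = stripped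
--         return None
--     return None
-- ===== SOURCE B (Python) =====
-- def _extract_embedded_auth(lines: list[str]) -> tuple[str, str | None] | None:
--     stripped = [line.strip() for line in lines]
--     open_i = next((i for i, s in enumerate(stripped) if s.lower() == "<auth-user-pass>"), None)
--     if open_i is None:
--         return None
--     close_i = next(
--         (i for i in range(open_i + 1, len(stripped)) if stripped[i].lower() == "</auth-user-pass>"),
--         None,
--     )
--     if close_i is None:
--         return None
--     fields = [s for s in stripped[open_i + 1 : close_i] if s]
--     username = fields[0] if fields else ""
--     password = fields[1] if len(fields) > 1 else None
--     return (username, password)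
-- ===== Notes on version B (the rewrite author's own statement) =====
-- stated objective: simpler
-- what changed: B separates block location from field extraction: it finds the open- and close-tag indices, slices the lines strictly between them, filters non-empty stripped lines and reads username/password positionally, instead of A's nested scan with mutable username/password state.
import Mathlib
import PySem

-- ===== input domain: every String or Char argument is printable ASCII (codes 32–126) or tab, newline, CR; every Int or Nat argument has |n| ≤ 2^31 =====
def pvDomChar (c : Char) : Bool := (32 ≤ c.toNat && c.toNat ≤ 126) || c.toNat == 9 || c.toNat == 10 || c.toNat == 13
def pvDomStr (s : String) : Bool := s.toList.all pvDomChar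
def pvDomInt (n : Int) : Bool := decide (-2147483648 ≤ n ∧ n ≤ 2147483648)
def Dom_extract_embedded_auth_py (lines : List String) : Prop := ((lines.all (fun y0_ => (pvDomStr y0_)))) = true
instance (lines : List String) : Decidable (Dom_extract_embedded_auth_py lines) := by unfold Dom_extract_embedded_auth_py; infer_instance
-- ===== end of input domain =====

-- B separates block location (find open/close tag indices) from field extraction
-- (slice between them, filter non-empty, read positionally) instead of A's nested
-- scan with mutable username/password state.  Objective: simpler.

-- ===== PORT A =====
-- inner 'for embedded_line in lines[index + 1 :]' loop with its mutable username/password state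
def pvInnerA : List String → Option String → Option String → Option (String × Option String)
  | [], _, _ => none
  | l :: rest, u, p =>
    let s := PySem.Str.strip l
    if PySem.Str.lower s == "</auth-user-pass>" then some (u.getD "", p)
    else if s != "" && u == none then pvInnerA rest (some s) p
    else if s != "" && p == none then pvInnerA rest u (some s)
    else pvInnerA rest u p

def extract_embedded_auth_py : List String → Option (String × Option String)
  | [] => none
  | l :: rest =>
    if PySem.Str.lower (PySem.Str.strip l) != "<auth-user-pass>" then
      extract_embedded_auth_py rest
    else
      pvInnerA rest none none   -- inner loop; Python returns None after it, never resuming the outer loop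

-- ===== PORT B =====
def extract_embedded_auth_py_alt (lines : List String) : Option (String × Option String) :=
  let stripped := lines.map PySem.Str.strip
  match stripped.findIdx? (fun s => PySem.Str.lower s == "<auth-user-pass>") with
  | none => none
  | some oi =>
    -- Python scans indices open_i+1 .. len-1 of 'stripped'; the drop is that index range
    match (stripped.drop (oi + 1)).findIdx? (fun s => PySem.Str.lower s == "</auth-user-pass>") with
    | none => none
    | some cj =>
      let fields := ((stripped.drop (oi + 1)).take cj).filter (fun s => s != "")
      some (fields.headD "", fields[1]?)

-- ===== PRECONDITION & SPEC =====
def Spec_extract_embedded_auth_py (lines : List String) (out : Option (String × Option String)) : Prop := out = extract_embedded_auth_py_alt lines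
instance (lines : List String) (out : Option (String × Option String)) : Decidable (Spec_extract_embedded_auth_py lines out) := by unfold Spec_extract_embedded_auth_py; infer_instance

-- ===== CLAIM (what is proved, stated in full; the proofs are below) =====
def Claim_equal_extract_embedded_auth_py : Prop := ∀ (lines : List String), Dom_extract_embedded_auth_py lines → Spec_extract_embedded_auth_py lines (extract_embedded_auth_py lines)

-- ===== LEMMAS AND PROOFS =====

-- what A's inner state machine does with a list of already-filtered fields
def pvFill : Option String → Option String → List String → String × Option String
  | u, p, [] => (u.getD "", p)
  | u, p, f :: fs =>
    if u == none then pvFill (some f) p fs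
    else if p == none then pvFill u (some f) fs
    else pvFill u p fs

theorem pvFill_some_some (a b : String) (l : List String) :
    pvFill (some a) (some b) l = (a, some b) := by
  induction l with
  | nil => rfl
  | cons f fs ih => simpa [pvFill] using ih

theorem pvFill_some_none (a : String) (l : List String) :
    pvFill (some a) none l = (a, l.head?) := by
  cases l with
  | nil => rfl
  | cons f fs => simp [pvFill, pvFill_some_some]

theorem pvFill_none_none (l : List String) :
    pvFill none none l = (l.headD "", l[1]?) := by
  cases l with
  | nil => rfl
  | cons f fs =>
    simp [pvFill, pvFill_some_none]
    cases fs <;> rfl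

theorem pvInnerA_eq (rest : List String) (u p : Option String) :
    pvInnerA rest u p =
      match (rest.map PySem.Str.strip).findIdx? (fun s => PySem.Str.lower s == "</auth-user-pass>") with
      | none => none
      | some cj =>
          some (pvFill u p (((rest.map PySem.Str.strip).take cj).filter (fun s => s != ""))) := by
  induction rest generalizing u p with
  | nil => rfl
  | cons l rest ih =>
    by_cases hc : (PySem.Str.lower (PySem.Str.strip l) == "</auth-user-pass>") = true
    · simp [pvInnerA, hc, List.findIdx?_cons, pvFill]
    · have hc' : ¬ (PySem.Str.lower (PySem.Str.strip l) = "</auth-user-pass>") := by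
        simpa using hc
      by_cases hs : (PySem.Str.strip l != "") = true
      · by_cases hu : (u == (none : Option String)) = true
        · simp only [pvInnerA, hc, hs, hu, Bool.and_self, if_true]
          cases h : (rest.map PySem.Str.strip).findIdx? (fun s => PySem.Str.lower s == "</auth-user-pass>") with
          | none => simp [ih, List.findIdx?_cons, hc', h]
          | some cj => simp [ih, List.findIdx?_cons, hc', h, List.take_succ_cons, List.filter_cons, hs, pvFill, hu]
        · by_cases hp : (p == (none : Option String)) = true
          · simp only [pvInnerA, hc, hs, hu, hp, if_true]
            cases h : (rest.map PySem.Str.strip).findIdx? (fun s => PySem.Str.lower s == "</auth-user-pass>") with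
            | none => simp [ih, List.findIdx?_cons, hc', h]
            | some cj => simp [ih, List.findIdx?_cons, hc', h, List.take_succ_cons, List.filter_cons, hs, pvFill, hu, hp]
          · simp only [pvInnerA, hc, hs, hu, hp, Bool.true_and]
            cases h : (rest.map PySem.Str.strip).findIdx? (fun s => PySem.Str.lower s == "</auth-user-pass>") with
            | none => simp [ih, List.findIdx?_cons, hc', h]
            | some cj => simp [ih, List.findIdx?_cons, hc', h, List.take_succ_cons, List.filter_cons, hs, pvFill, hu, hp]
      · simp only [pvInnerA, hc, hs, Bool.false_and]
        cases h : (rest.map PySem.Str.strip).findIdx? (fun s => PySem.Str.lower s == "</auth-user-pass>") with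
        | none => simp [ih, List.findIdx?_cons, hc', h]
        | some cj => simp [ih, List.findIdx?_cons, hc', h, List.take_succ_cons, hs]

theorem pv_main (lines : List String) :
    extract_embedded_auth_py lines = extract_embedded_auth_py_alt lines := by
  induction lines with
  | nil => rfl
  | cons l rest ih =>
    by_cases ho : (PySem.Str.lower (PySem.Str.strip l) == "<auth-user-pass>") = true
    · have ho' : PySem.Str.lower (PySem.Str.strip l) = "<auth-user-pass>" := by simpa using ho
      simp only [extract_embedded_auth_py, bne, ho, Bool.not_true]
      rw [pvInnerA_eq]
      cases h : (rest.map PySem.Str.strip).findIdx? (fun s => PySem.Str.lower s == "</auth-user-pass>") with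
      | none => simp [extract_embedded_auth_py_alt, List.findIdx?_cons, ho', h]
      | some cj => simp [extract_embedded_auth_py_alt, List.findIdx?_cons, ho', h, pvFill_none_none]
    · have ho' : ¬ (PySem.Str.lower (PySem.Str.strip l) = "<auth-user-pass>") := by simpa using ho
      simp only [extract_embedded_auth_py, bne, ho, Bool.not_false, if_true]
      rw [ih]
      cases h : (rest.map PySem.Str.strip).findIdx? (fun s => PySem.Str.lower s == "<auth-user-pass>") with
      | none => simp [extract_embedded_auth_py_alt, List.findIdx?_cons, ho', h]
      | some oi => simp [extract_embedded_auth_py_alt, List.findIdx?_cons, ho', h, List.drop_succ_cons]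

-- ===== VERDICT (by name: the statement is the Claim_ definition above) =====
theorem extract_embedded_auth_py_spec : Claim_equal_extract_embedded_auth_py := by
  intro lines _
  exact pv_main lines
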